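-- pv_equiv track=rewrite | github.com/kodcdangky/google-foobar | disorderly-escape/main.py | new_gcd_table
-- ===== SOURCE A (Python) =====
-- def new_gcd_table(n):
--     """
--     Returns a new greatest common divisor table between integers from 1 to n for constant time look up
--     """
--     gcd_table = [[None for _ in range(n + 1)] for _ in range(n + 1)]
--     for i in range(n + 1):
--         for j in range(i, n + 1):
--             if i == j == 0:
--                 continue
--             if 0 in (i, j):
--                 gcd_table[i][j] = gcd_table[j][i] = max(i, j)
--             elif 0 in (i % j, j % i):
--                 gcd_table[i][j] = gcd_table[j][i] = min(i, j)
--             else: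
--                 gcd_table[i][j] = gcd_table[j][i] = gcd_table[min(i, j)][
--                     max(i, j) % min(i, j)
--                 ]
--     return gcd_table
-- ===== SOURCE B (Python) =====
-- def new_gcd_table(n):
--     """
--     Returns a new greatest common divisor table between integers from 1 to n for constant time look up
--     """
--
--     def gcd(a, b):
--         while b:
--             a, b = b, a % b
--         return a
--
--     return [
--         [None if i == 0 and j == 0 else gcd(i, j) for j in range(n + 1)]
--         for i in range(n + 1)
--     ]
-- ===== Notes on version B (the rewrite author's own statement) =====
-- stated objective: simpler
-- what changed: Each cell (i,j) is computed independently by an inline Euclidean while-loop inside a nested comprehension, instead of A's in-place table mutated with symmetric writes and memoized lookups into previously filled cells; the gcd(0,0) cell stays None as in A.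
import Mathlib
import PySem

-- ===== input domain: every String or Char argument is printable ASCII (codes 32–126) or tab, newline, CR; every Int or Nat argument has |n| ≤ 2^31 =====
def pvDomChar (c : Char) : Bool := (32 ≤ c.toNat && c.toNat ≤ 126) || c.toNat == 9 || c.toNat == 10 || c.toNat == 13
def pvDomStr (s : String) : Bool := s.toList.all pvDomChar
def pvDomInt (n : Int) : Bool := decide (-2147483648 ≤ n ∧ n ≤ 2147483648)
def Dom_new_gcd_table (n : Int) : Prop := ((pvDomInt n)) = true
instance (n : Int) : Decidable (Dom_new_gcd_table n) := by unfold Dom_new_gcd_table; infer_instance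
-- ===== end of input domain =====

-- B recomputes every cell with an independent Euclidean loop instead of A's mutated memoized table (objective: simpler).

-- ===== PORT A =====
-- gcd_table[i][j]  (indices here always come from range(...), hence nonnegative and in range, so .toNat is exact)
def pvGetCell (t : List (List (Option Int))) (i j : Int) : Option Int :=
  (t.getD i.toNat []).getD j.toNat none

-- gcd_table[i][j] = v  (single in-place assignment)
def pvSetCell (t : List (List (Option Int))) (i j : Int) (v : Option Int) : List (List (Option Int)) :=
  t.set i.toNat ((t.getD i.toNat []).set j.toNat v)

-- gcd_table[i][j] = gcd_table[j][i] = v  (Python chained assignment, left to right)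
def pvSetSym (t : List (List (Option Int))) (i j : Int) (v : Option Int) : List (List (Option Int)) :=
  pvSetCell (pvSetCell t i j v) j i v

def new_gcd_table (n : Int) : List (List (Option Int)) :=
  let rng := PySem.List.pyRange 0 (n + 1) 1
  let init : List (List (Option Int)) := rng.map (fun _ => rng.map (fun _ => none))
  rng.foldl (fun t i =>
    (PySem.List.pyRange i (n + 1) 1).foldl (fun t j =>
      if i = 0 ∧ j = 0 then t
      else if i = 0 ∨ j = 0 then pvSetSym t i j (some (max i j))
      else if PySem.Int.mod i j = 0 ∨ PySem.Int.mod j i = 0 then pvSetSym t i j (some (min i j))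
      else pvSetSym t i j (pvGetCell t (min i j) (PySem.Int.mod (max i j) (min i j)))) t) init

-- ===== PORT B =====
-- termination of the Euclidean loop: |a % b| < |b| for b ≠ 0 (Python % takes the divisor's sign)
theorem pvModAbsLt (a b : Int) (hb : b ≠ 0) : (PySem.Int.mod a b).natAbs < b.natAbs := by
  rcases lt_or_gt_of_ne hb with h | h
  · have := PySem.Int.mod_neg_bounds a h
    omega
  · have h1 := PySem.Int.mod_nonneg a h
    have h2 := PySem.Int.mod_lt a h
    omega

-- while b: a, b = b, a % b ; return a
def pvGcd (a b : Int) : Int :=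
  if h : b ≠ 0 then pvGcd b (PySem.Int.mod a b) else a
termination_by b.natAbs
decreasing_by exact pvModAbsLt a b h

def new_gcd_table_alt (n : Int) : List (List (Option Int)) :=
  (PySem.List.pyRange 0 (n + 1) 1).map (fun i =>
    (PySem.List.pyRange 0 (n + 1) 1).map (fun j =>
      if i = 0 ∧ j = 0 then none else some (pvGcd i j)))

-- ===== PRECONDITION & SPEC =====
def Spec_new_gcd_table (n : Int) (out : List (List (Option Int))) : Prop := out = new_gcd_table_alt n
instance (n : Int) (out : List (List (Option Int))) : Decidable (Spec_new_gcd_table n out) := by unfold Spec_new_gcd_table; infer_instance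

-- ===== CLAIM (what is proved, stated in full; the proofs are below) =====
def Claim_equal_new_gcd_table : Prop := ∀ (n : Int), Dom_new_gcd_table n → Spec_new_gcd_table n (new_gcd_table n)

-- ===== LEMMAS AND PROOFS =====

-- entry of the table at Nat indices
def pvEnt (t : List (List (Option Int))) (a b : Nat) : Option Int :=
  (t.getD a []).getD b none

-- the table t has shape N×N and its entries are described by F (inside the square)
def pvGood (N : Nat) (t : List (List (Option Int))) (F : Nat → Nat → Option Int) : Prop :=
  t.length = N ∧ (∀ a, a < N → (t.getD a []).length = N) ∧
    (∀ a b, a < N → b < N → pvEnt t a b = F a b)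

-- entries already filled after the outer loop has processed i = 0 .. k-1
def pvFout (k : Nat) (a b : Nat) : Option Int :=
  if min a b < k ∧ ¬(a = 0 ∧ b = 0) then some (Nat.gcd a b : Int) else none

-- entries filled during row k once the inner loop has processed j = k .. j0-1
def pvFin (k j0 : Nat) (a b : Nat) : Option Int :=
  if (min a b < k ∨ (min a b = k ∧ max a b < j0)) ∧ ¬(a = 0 ∧ b = 0) then
    some (Nat.gcd a b : Int) else none

theorem pvGood_congr {N : Nat} {t : List (List (Option Int))} {F G : Nat → Nat → Option Int}
    (h : pvGood N t F) (hFG : ∀ a b, a < N → b < N → F a b = G a b) : pvGood N t G := by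
  refine ⟨h.1, h.2.1, fun a b ha hb => ?_⟩
  rw [h.2.2 a b ha hb, hFG a b ha hb]

theorem pvGcd_natCast (a b : Nat) : pvGcd (a : Int) (b : Int) = (Nat.gcd b a : Int) := by
  induction b using Nat.strong_induction_on generalizing a with
  | _ b ih =>
    rw [pvGcd]
    by_cases hb : b = 0
    · subst hb; simp
    · have hbne : (b : Int) ≠ 0 := by exact_mod_cast hb
      rw [dif_pos hbne, PySem.Int.mod_natCast a b,
        ih (a % b) (Nat.mod_lt _ (Nat.pos_of_ne_zero hb)) b, Nat.gcd_rec b a]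

theorem pvGood_init (N : Nat) (hN : (PySem.List.pyRange 0 (N : Int) 1).length = N) :
    pvGood N ((PySem.List.pyRange 0 (N : Int) 1).map
        (fun _ => (PySem.List.pyRange 0 (N : Int) 1).map (fun _ => (none : Option Int))))
      (fun _ _ => none) := by
  refine ⟨by simp [hN], fun a ha => ?_, fun a b ha hb => ?_⟩
  · simp [List.getD_eq_getElem?_getD, hN, ha]
  · simp [pvEnt, List.getD_eq_getElem?_getD, hN, ha, hb]

theorem pvGood_setCell {N : Nat} {t : List (List (Option Int))} {F : Nat → Nat → Option Int}
    (h : pvGood N t F) (a b : Nat) (ha : a < N) (hb : b < N) (v : Option Int) :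
    pvGood N (pvSetCell t (a : Int) (b : Int) v)
      (fun x y => if x = a ∧ y = b then v else F x y) := by
  obtain ⟨hlen, hrow, hent⟩ := h
  have hsc : pvSetCell t (a : Int) (b : Int) v = t.set a ((t.getD a []).set b v) := by
    simp [pvSetCell]
  set r : List (Option Int) := (t.getD a []).set b v with hr
  have hget : ∀ x, (t.set a r).getD x [] = if a = x then r else t.getD x [] := by
    intro x
    rw [List.getD_eq_getElem?_getD, List.getElem?_set]
    split
    · rw [if_pos (show a < t.length by omega)]
      rfl
    · rw [← List.getD_eq_getElem?_getD]
  rw [hsc]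
  refine ⟨by simp [hlen], fun x hx => ?_, fun x y hx hy => ?_⟩
  · rw [hget x]
    split
    · rename_i hax; rw [hr, List.length_set]; exact hax ▸ hrow a ha
    · exact hrow x hx
  · show pvEnt (t.set a r) x y = if x = a ∧ y = b then v else F x y
    rw [pvEnt, hget x]
    by_cases hax : x = a
    · subst hax
      rw [if_pos rfl, hr, List.getD_eq_getElem?_getD, List.getElem?_set]
      by_cases hby : y = b
      · subst hby
        rw [if_pos rfl, if_pos (by rw [hrow x hx]; exact hb), if_pos ⟨rfl, rfl⟩]
        rfl
      · rw [if_neg (by omega), if_neg (by tauto), ← List.getD_eq_getElem?_getD,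
          ← pvEnt, hent x y hx hy]
    · rw [if_neg (by omega), if_neg (by tauto), ← pvEnt, hent x y hx hy]

theorem pvGood_setSym {N : Nat} {t : List (List (Option Int))} {F : Nat → Nat → Option Int}
    (h : pvGood N t F) (a b : Nat) (ha : a < N) (hb : b < N) (v : Option Int) :
    pvGood N (pvSetSym t (a : Int) (b : Int) v)
      (fun x y => if (x = a ∧ y = b) ∨ (x = b ∧ y = a) then v else F x y) := by
  have h1 := pvGood_setCell h a b ha hb v
  have h2 := pvGood_setCell h1 b a hb ha v
  rw [pvSetSym]
  refine pvGood_congr h2 (fun x y hx hy => ?_)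
  by_cases hba : x = b ∧ y = a
  · rw [if_pos hba, if_pos (Or.inr hba)]
  · rw [if_neg hba]
    by_cases hab : x = a ∧ y = b
    · rw [if_pos hab, if_pos (Or.inl hab)]
    · rw [if_neg hab, if_neg (by tauto)]

theorem pvGood_eq_map {N : Nat} {t : List (List (Option Int))} {F : Nat → Nat → Option Int}
    (h : pvGood N t F) :
    t = (List.range N).map (fun a => (List.range N).map (fun b => F a b)) := by
  obtain ⟨hlen, hrow, hent⟩ := h
  apply List.ext_getElem (by simp [hlen])
  intro a h1 h2
  have ha : a < N := by simpa [hlen] using h1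
  have hrowa : (t.getD a []).length = N := hrow a ha
  have hta : t[a]? = some t[a] := List.getElem?_eq_getElem h1
  have hget : t.getD a [] = t[a] := by rw [List.getD_eq_getElem?_getD, hta]; rfl
  simp only [List.getElem_map, List.getElem_range]
  apply List.ext_getElem (by rw [← hget, hrowa]; simp)
  intro b h3 h4
  have hb : b < N := by rw [← hget] at h3; omega
  simp only [List.getElem_map, List.getElem_range]
  have := hent a b ha hb
  rw [pvEnt, hget] at this
  rw [← this, List.getD_eq_getElem?_getD, List.getElem?_eq_getElem h3]
  rfl

-- writing gcd(k,j) symmetrically at (k,j),(j,k) advances the inner invariant from j to j+1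
theorem pvFin_step (N k j : Nat) (hkj : k ≤ j) (hj : j < N) (hnz : ¬(k = 0 ∧ j = 0)) :
    ∀ x y, x < N → y < N →
      (if (x = k ∧ y = j) ∨ (x = j ∧ y = k) then some ((Nat.gcd k j : Nat) : Int)
        else pvFin k j x y) = pvFin k (j + 1) x y := by
  intro x y hx hy
  by_cases hxy : (x = k ∧ y = j) ∨ (x = j ∧ y = k)
  · rw [if_pos hxy]
    rcases hxy with ⟨hx', hy'⟩ | ⟨hx', hy'⟩ <;> subst hx' <;> subst hy'
    · rw [pvFin, if_pos (by constructor <;> omega)]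
    · rw [pvFin, if_pos (by constructor <;> omega), Nat.gcd_comm]
  · rw [if_neg hxy]
    simp only [pvFin]
    split_ifs <;> first | rfl | omega

theorem pvInner (N k j : Nat) (hk : k < N) (t : List (List (Option Int)))
    (hkj : k ≤ j) (hjN : j ≤ N) (h : pvGood N t (pvFin k j)) :
    pvGood N ((PySem.List.pyRange (j : Int) (N : Int) 1).foldl (fun t j =>
      if (k : Int) = 0 ∧ j = 0 then t
      else if (k : Int) = 0 ∨ j = 0 then pvSetSym t (k : Int) j (some (max (k : Int) j))
      else if PySem.Int.mod (k : Int) j = 0 ∨ PySem.Int.mod j (k : Int) = 0 then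
        pvSetSym t (k : Int) j (some (min (k : Int) j))
      else pvSetSym t (k : Int) j
        (pvGetCell t (min (k : Int) j) (PySem.Int.mod (max (k : Int) j) (min (k : Int) j)))) t)
      (pvFin k N) := by
  by_cases hjN' : j = N
  · subst hjN'
    rw [PySem.List.pyRange_one_eq_nil le_rfl]
    simpa using h
  · have hj : j < N := lt_of_le_of_ne hjN hjN'
    rw [PySem.List.pyRange_one_cons (by exact_mod_cast hj), List.foldl_cons,
      show ((j : Int) + 1) = ((j + 1 : Nat) : Int) by push_cast; ring]
    refine pvInner N k (j + 1) hk _ (by omega) hj ?_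
    by_cases hk0 : k = 0
    · subst hk0
      by_cases hj0 : j = 0
      · subst hj0
        rw [if_pos ⟨rfl, rfl⟩]
        refine pvGood_congr h (fun x y hx hy => ?_)
        simp only [pvFin]
        split_ifs <;> first | rfl | omega
      · have hj0' : (j : Int) ≠ 0 := by exact_mod_cast hj0
        rw [if_neg (fun hc => hj0' hc.2), if_pos (Or.inl (by norm_num))]
        have hval : (some (max ((0 : Nat) : Int) (j : Nat)) : Option Int) =
            some ((Nat.gcd 0 j : Nat) : Int) := by
          simp
        rw [hval]
        exact pvGood_congr (pvGood_setSym h 0 j hk hj _)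
          (pvFin_step N 0 j (by omega) hj (by omega))
    · have hkne : (k : Int) ≠ 0 := by exact_mod_cast hk0
      have hjpos : 0 < j := by omega
      have hjne : (j : Int) ≠ 0 := by exact_mod_cast (by omega : j ≠ 0)
      rw [if_neg (fun hc => hkne hc.1), if_neg (by tauto)]
      have hmin : min (k : Int) (j : Int) = (k : Int) := min_eq_left (by exact_mod_cast hkj)
      have hmax : max (k : Int) (j : Int) = (j : Int) := max_eq_right (by exact_mod_cast hkj)
      by_cases hC : PySem.Int.mod (k : Int) (j : Int) = 0 ∨ PySem.Int.mod (j : Int) (k : Int) = 0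
      · rw [if_pos hC]
        have hdvd : k ∣ j := by
          rcases hC with hc | hc
          · rw [PySem.Int.mod_natCast] at hc
            have h1 : k % j = 0 := by exact_mod_cast hc
            have h2 : j ≤ k := Nat.le_of_dvd (by omega) (Nat.dvd_of_mod_eq_zero h1)
            have h3 : j = k := by omega
            exact h3 ▸ dvd_refl k
          · rw [PySem.Int.mod_natCast] at hc
            exact Nat.dvd_of_mod_eq_zero (by exact_mod_cast hc)
        have hval : (some (min (k : Int) (j : Int)) : Option Int) =
            some ((Nat.gcd k j : Nat) : Int) := by
          rw [hmin, Nat.gcd_eq_left hdvd]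
        rw [hval]
        exact pvGood_congr (pvGood_setSym h k j hk hj _)
          (pvFin_step N k j hkj hj (by omega))
      · rw [if_neg hC]
        have hmne : j % k ≠ 0 := by
          intro hz
          exact hC (Or.inr (by rw [PySem.Int.mod_natCast]; exact_mod_cast hz))
        have hmlt : j % k < k := Nat.mod_lt j (by omega)
        rw [hmin, hmax, PySem.Int.mod_natCast]
        have hget : pvGetCell t (k : Int) ((j % k : Nat) : Int) = pvFin k j k (j % k) := by
          rw [← h.2.2 k (j % k) hk (by omega)]
          simp only [pvGetCell, pvEnt, Int.toNat_natCast]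
        have hfin : pvFin k j k (j % k) = some ((Nat.gcd k j : Nat) : Int) := by
          rw [pvFin, if_pos (by constructor <;> omega), Nat.gcd_comm, ← Nat.gcd_rec]
        rw [hget, hfin]
        exact pvGood_congr (pvGood_setSym h k j hk hj _)
          (pvFin_step N k j hkj hj (by omega))
termination_by N - j

theorem pvOuter (N k : Nat) (t : List (List (Option Int))) (hkN : k ≤ N)
    (h : pvGood N t (pvFout k)) :
    pvGood N ((PySem.List.pyRange (k : Int) (N : Int) 1).foldl (fun t i =>
      (PySem.List.pyRange i (N : Int) 1).foldl (fun t j =>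
        if i = 0 ∧ j = 0 then t
        else if i = 0 ∨ j = 0 then pvSetSym t i j (some (max i j))
        else if PySem.Int.mod i j = 0 ∨ PySem.Int.mod j i = 0 then pvSetSym t i j (some (min i j))
        else pvSetSym t i j (pvGetCell t (min i j) (PySem.Int.mod (max i j) (min i j)))) t) t)
      (pvFout N) := by
  by_cases hkN' : k = N
  · subst hkN'
    rw [PySem.List.pyRange_one_eq_nil le_rfl]
    simpa using h
  · have hk : k < N := lt_of_le_of_ne hkN hkN'
    rw [PySem.List.pyRange_one_cons (by exact_mod_cast hk), List.foldl_cons]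
    have hstart : pvGood N t (pvFin k k) := by
      refine pvGood_congr h (fun x y hx hy => ?_)
      simp only [pvFout, pvFin]
      split_ifs <;> first | rfl | omega
    have hin := pvInner N k k hk t le_rfl (le_of_lt hk) hstart
    rw [show ((k : Int) + 1) = ((k + 1 : Nat) : Int) by push_cast; ring]
    refine pvOuter N (k + 1) _ (by omega) ?_
    refine pvGood_congr hin (fun x y hx hy => ?_)
    simp only [pvFout, pvFin]
    split_ifs <;> first | rfl | omega
termination_by N - k

-- ===== VERDICT (by name: the statement is the Claim_ definition above) =====
theorem new_gcd_table_spec : Claim_equal_new_gcd_table := by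
  intro n _
  unfold Spec_new_gcd_table
  by_cases hn : n + 1 ≤ 0
  · simp [new_gcd_table, new_gcd_table_alt, PySem.List.pyRange_one_eq_nil hn]
  · set N := (n + 1).toNat with hNdef
    have hcast : n + 1 = (N : Int) := by omega
    simp only [new_gcd_table, new_gcd_table_alt, hcast]
    have hlen : (PySem.List.pyRange 0 ((N : Nat) : Int) 1).length = N := by
      rw [PySem.List.length_pyRange_one]; omega
    have hinit : pvGood N ((PySem.List.pyRange 0 ((N : Nat) : Int) 1).map
        (fun _ => (PySem.List.pyRange 0 ((N : Nat) : Int) 1).map (fun _ => (none : Option Int))))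
        (pvFout 0) := pvGood_congr (pvGood_init N hlen)
      (fun x y hx hy => by simp only [pvFout]; rw [if_neg (by omega)])
    have hA := pvOuter N 0 _ (by omega) hinit
    rw [Nat.cast_zero] at hA
    rw [pvGood_eq_map hA, PySem.List.pyRange_zero_nat N, List.map_map]
    refine List.map_congr_left (fun a ha => ?_)
    have haN : a < N := List.mem_range.mp ha
    simp only [Function.comp_apply, List.map_map]
    refine List.map_congr_left (fun b hb => ?_)
    have hbN : b < N := List.mem_range.mp hb
    simp only [Function.comp_apply]
    by_cases hab : a = 0 ∧ b = 0
    · rw [pvFout, if_neg (by tauto), if_pos (by exact_mod_cast hab)]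
    · rw [pvFout, if_pos ⟨by omega, hab⟩,
        if_neg (by simpa using fun h1 h2 => hab ⟨by exact_mod_cast h1, by exact_mod_cast h2⟩),
        pvGcd_natCast, Nat.gcd_comm]
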